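-- pv_equiv track=rewrite | github.com/mptyl/ThothAI | frontend/sql_generator/helpers/template_preparation.py | clean_template_for_llm
-- ===== SOURCE A (Python) =====
-- import itertools
--
-- def clean_template_for_llm(raw_template: str) -> str:
--     """
--     Cleans and normalizes template text to make it more digestible for LLMs.
--
--     Args:
--         raw_template: The raw template string
--
--     Returns:
--         str: Cleaned template text
--     """
--     lines = raw_template.splitlines()
--     cleaned_lines = []
--
--     for line in lines:
--         line = line.strip()
--
--         # Skip empty lines or lines with just decorative characters
--         if not line or all(c in '=#-.*/' for c in line):
--             continue
--
--         # Remove redundant markdown headers if they don't add value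
--         if line.startswith('#') and len(line) < 5:
--             continue
--
--         # Normalize whitespace between sections
--         if line.startswith('#'):
--             if cleaned_lines:
--                 cleaned_lines.append('')
--
--         # Remove redundant backticks from code block markers
--         if line.startswith('```') and len(line) <= 4:
--             cleaned_lines.append('```')
--         else:
--             cleaned_lines.append(line)
--
--     # Join lines with proper spacing
--     cleaned_text = '\n'.join(cleaned_lines)
--
--     # Remove multiple consecutive blank lines
--     cleaned_text = '\n'.join(line for line, _ in itertools.groupby(cleaned_text.splitlines()))
--
--     return cleaned_text
-- ===== SOURCE B (Python) =====
-- def clean_template_for_llm(raw_template: str) -> str: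
--     """Single streaming pass: collapse consecutive duplicate lines while
--     building the output, instead of a second groupby pass."""
--     pieces = []
--     last = None
--     for raw in raw_template.splitlines():
--         s = raw.strip()
--
--         # Skip empty lines or lines with just decorative characters
--         if not s or all(c in '=#-.*/' for c in s):
--             continue
--
--         # Skip short markdown headers
--         if s.startswith('#'):
--             if len(s) < 5:
--                 continue
--             # blank separator before a section (never duplicated)
--             if last is not None and last != '':
--                 pieces.append('')
--                 last = ''
--
--         # Normalize code fence markers
--         if s.startswith('```') and len(s) <= 4:
--             s = '```'
--
--         # Collapse consecutive duplicates on the fly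
--         if s != last:
--             pieces.append(s)
--             last = s
--
--     return '\n'.join(pieces)
-- ===== Notes on version B (the rewrite author's own statement) =====
-- stated objective: simpler
-- what changed: Folds A's final itertools.groupby consecutive-duplicate collapse into the line loop by tracking the last emitted line, replacing A's two-pass build/join/re-splitlines/groupby structure with a single streaming pass (and dropping the itertools import).
import Mathlib
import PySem

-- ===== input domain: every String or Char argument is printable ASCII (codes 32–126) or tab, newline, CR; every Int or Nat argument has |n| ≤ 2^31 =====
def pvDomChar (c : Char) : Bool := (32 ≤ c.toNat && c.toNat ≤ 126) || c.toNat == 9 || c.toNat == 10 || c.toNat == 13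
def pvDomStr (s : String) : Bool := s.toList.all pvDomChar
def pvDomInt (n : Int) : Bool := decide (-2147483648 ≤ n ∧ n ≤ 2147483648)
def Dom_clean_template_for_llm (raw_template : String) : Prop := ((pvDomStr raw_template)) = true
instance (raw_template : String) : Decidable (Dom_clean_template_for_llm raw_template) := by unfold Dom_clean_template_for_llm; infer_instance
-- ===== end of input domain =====

-- B folds A's final itertools.groupby duplicate-collapse into the line loop (tracking the last
-- emitted line), replacing A's build/join/resplit/groupby two-pass with one streaming pass (simpler).

-- ===== PORT A =====
-- '=#-.*/' as a character list; 'c in "=#-.*/"' is membership in it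
def pvDeco : List Char := ['=', '#', '-', '.', '*', '/']

-- the body of A's for-loop: state = cleaned_lines
def pvCleanStepA (cleaned_lines : List String) (ln : String) : List String :=
  let line := PySem.Str.strip ln
  if line.toList.isEmpty || line.toList.all (fun c => pvDeco.contains c) then cleaned_lines
  else if PySem.Str.startswith line "#" && decide (PySem.Str.len line < 5) then cleaned_lines
  else
    let cl := if PySem.Str.startswith line "#" && !cleaned_lines.isEmpty
              then cleaned_lines ++ [""] else cleaned_lines
    if PySem.Str.startswith line "```" && decide (PySem.Str.len line ≤ 4)
    then cl ++ ["```"] else cl ++ [line]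

-- '[line for line, _ in itertools.groupby(lines)]' = first of each run = drop consecutive duplicates
def pvCollapse : List String → List String
  | [] => []
  | [x] => [x]
  | x :: y :: r => if x = y then pvCollapse (y :: r) else x :: pvCollapse (y :: r)

def clean_template_for_llm (raw_template : String) : String :=
  let lines := PySem.Str.splitlines raw_template
  let cleaned_lines := lines.foldl pvCleanStepA []
  let cleaned_text := PySem.Str.join "\n" cleaned_lines
  PySem.Str.join "\n" (pvCollapse (PySem.Str.splitlines cleaned_text))

-- ===== PORT B =====
-- 'last is not None and last != ""'
def pvLastNonempty : Option String → Bool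
  | none => false
  | some l => !(l == "")

-- the body of B's loop: state = (pieces, last); 'continue' is ported as returning the state
def pvCleanStepB (st : List String × Option String) (ln : String) : List String × Option String :=
  let s := PySem.Str.strip ln
  if s.toList.isEmpty || s.toList.all (fun c => pvDeco.contains c) then st
  else if PySem.Str.startswith s "#" && decide (PySem.Str.len s < 5) then st
  else
    let st1 := if PySem.Str.startswith s "#" && pvLastNonempty st.2
               then (st.1 ++ [""], some "") else st
    let s1 := if PySem.Str.startswith s "```" && decide (PySem.Str.len s ≤ 4) then "```" else s
    if st1.2 = some s1 then st1 else (st1.1 ++ [s1], some s1)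

def clean_template_for_llm_alt (raw_template : String) : String :=
  PySem.Str.join "\n" ((PySem.Str.splitlines raw_template).foldl pvCleanStepB ([], none)).1

-- ===== PRECONDITION & SPEC =====
def Spec_clean_template_for_llm (raw_template : String) (out : String) : Prop := out = clean_template_for_llm_alt raw_template
instance (raw_template : String) (out : String) : Decidable (Spec_clean_template_for_llm raw_template out) := by unfold Spec_clean_template_for_llm; infer_instance

-- ===== CLAIM (what is proved, stated in full; the proofs are below) =====
def Claim_equal_clean_template_for_llm : Prop := ∀ (raw_template : String), Dom_clean_template_for_llm raw_template → Spec_clean_template_for_llm raw_template (clean_template_for_llm raw_template)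

-- ===== LEMMAS AND PROOFS =====

-- the line-break test used by PySem.Chars.splitlines
def pvIsBrk (c : Char) : Bool :=
  decide (c.toNat = 10) || decide (c.toNat = 13) || decide (c.toNat = 11) || decide (c.toNat = 12) ||
  decide (c.toNat = 28) || decide (c.toNat = 29) || decide (c.toNat = 30) || decide (c.toNat = 133) ||
  decide (c.toNat = 8232) || decide (c.toNat = 8233)

def pvNB (s : String) : Prop := ∀ c ∈ s.toList, pvIsBrk c = false

def pvGood (acc : List String) : Prop := (∀ l ∈ acc, pvNB l) ∧ acc.getLast? ≠ some ""

theorem pvSplitlines_eq (s : List Char) :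
    PySem.Chars.splitlines s = PySem.Chars.splitlines.go pvIsBrk s [] [] := rfl

theorem pvGo_nil (isB : Char → Bool) (cur : List Char) (acc : List (List Char)) :
    PySem.Chars.splitlines.go isB [] cur acc =
      if cur.isEmpty then acc.reverse else (cur.reverse :: acc).reverse := by
  rw [PySem.Chars.splitlines.go.eq_def]

theorem pvGo_crlf (isB : Char → Bool) (rest cur : List Char) (acc : List (List Char)) :
    PySem.Chars.splitlines.go isB ('\x0d' :: '\n' :: rest) cur acc =
      PySem.Chars.splitlines.go isB rest [] (cur.reverse :: acc) := by
  rw [PySem.Chars.splitlines.go.eq_def]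
  rfl

theorem pvGo_cons (isB : Char → Bool) (c : Char) (rest cur : List Char) (acc : List (List Char))
    (hne : ¬(c = '\x0d' ∧ ∃ r, rest = '\n' :: r)) :
    PySem.Chars.splitlines.go isB (c :: rest) cur acc =
      if isB c then PySem.Chars.splitlines.go isB rest [] (cur.reverse :: acc)
      else PySem.Chars.splitlines.go isB rest (c :: cur) acc := by
  rw [PySem.Chars.splitlines.go.eq_def]
  split
  · simp at *
  · rename_i h; injection h with h1 h2; exact absurd ⟨h1, _, h2⟩ hne
  · rename_i c' rest' hg heq
    injection heq with h1 h2; subst h1; subst h2; rfl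

theorem pvIsBrk_cr : pvIsBrk '\x0d' = true := by decide

theorem pvGo_cons_nb (c : Char) (rest cur : List Char) (acc : List (List Char))
    (h : pvIsBrk c = false) :
    PySem.Chars.splitlines.go pvIsBrk (c :: rest) cur acc =
      PySem.Chars.splitlines.go pvIsBrk rest (c :: cur) acc := by
  have hne : ¬(c = '\x0d' ∧ ∃ r, rest = '\n' :: r) := by
    rintro ⟨rfl, -⟩; rw [pvIsBrk_cr] at h; cases h
  rw [pvGo_cons pvIsBrk c rest cur acc hne, h]; simp

theorem pvGo_nl (rest cur : List Char) (acc : List (List Char)) :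
    PySem.Chars.splitlines.go pvIsBrk ('\n' :: rest) cur acc =
      PySem.Chars.splitlines.go pvIsBrk rest [] (cur.reverse :: acc) := by
  have hne : ¬(('\n' : Char) = '\x0d' ∧ ∃ r, rest = '\n' :: r) := by
    rintro ⟨h, -⟩; cases h
  rw [pvGo_cons pvIsBrk '\n' rest cur acc hne]
  simp [pvIsBrk]

theorem pvGo_prefix (cs : List Char) (h : ∀ c ∈ cs, pvIsBrk c = false)
    (t cur : List Char) (acc : List (List Char)) :
    PySem.Chars.splitlines.go pvIsBrk (cs ++ t) cur acc =
      PySem.Chars.splitlines.go pvIsBrk t (cs.reverse ++ cur) acc := by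
  induction cs generalizing cur with
  | nil => simp
  | cons c cs ih =>
    rw [List.cons_append, pvGo_cons_nb c _ cur acc (h c (by simp)), ih (fun d hd => h d (by simp [hd]))]
    simp

-- every chunk splitlines emits is free of line-break characters
theorem pvGo_chunks :
    ∀ (s cur : List Char) (acc : List (List Char)),
      (∀ l ∈ acc, ∀ c ∈ l, pvIsBrk c = false) → (∀ c ∈ cur, pvIsBrk c = false) →
      ∀ l ∈ PySem.Chars.splitlines.go pvIsBrk s cur acc, ∀ c ∈ l, pvIsBrk c = false := by
  intro s cur acc
  induction s, cur, acc using PySem.Chars.splitlines.go.induct (isB := pvIsBrk) with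
  | case1 cur acc hcur =>
    intro hacc _ l hl
    rw [pvGo_nil, if_pos hcur] at hl
    exact hacc l (by simpa using hl)
  | case2 cur acc hcur =>
    intro hacc hc l hl
    rw [pvGo_nil, if_neg hcur] at hl
    rcases (by simpa using hl : l ∈ acc ∨ l = cur.reverse) with h | rfl
    · exact hacc l h
    · intro d hdm; exact hc d (List.mem_reverse.mp hdm)
  | case3 rest cur acc ih =>
    intro hacc hc l hl
    rw [pvGo_crlf] at hl
    refine ih ?_ (by simp) l hl
    intro m hm
    rcases List.mem_cons.mp hm with rfl | hm
    · intro c hcm; exact hc c (List.mem_reverse.mp hcm)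
    · exact hacc m hm
  | case4 c rest cur acc hne hc ih =>
    intro hacc hcur l hl
    rw [pvGo_cons pvIsBrk c rest cur acc (by rintro ⟨rfl, r, rfl⟩; exact hne r rfl rfl), if_pos hc] at hl
    refine ih ?_ (by simp) l hl
    intro m hm
    rcases List.mem_cons.mp hm with rfl | hm
    · intro d hdm; exact hcur d (List.mem_reverse.mp hdm)
    · exact hacc m hm
  | case5 c rest cur acc hne hc ih =>
    intro hacc hcur l hl
    rw [pvGo_cons pvIsBrk c rest cur acc (by rintro ⟨rfl, r, rfl⟩; exact hne r rfl rfl),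
        if_neg (by simpa using hc)] at hl
    refine ih hacc ?_ l hl
    intro d hd
    rcases List.mem_cons.mp hd with rfl | hd
    · simpa using hc
    · exact hcur d hd

theorem pvCollapse_append (acc : List String) (x : String) :
    pvCollapse (acc ++ [x]) =
      if acc.getLast? = some x then pvCollapse acc else pvCollapse acc ++ [x] := by
  induction acc using pvCollapse.induct with
  | case1 => simp [pvCollapse]
  | case2 a =>
    by_cases h : a = x
    · subst h; simp [pvCollapse]
    · simp [pvCollapse, h]
  | case3 b r ih =>
    simp only [List.cons_append, pvCollapse, List.getLast?_cons_cons] at *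
    exact ih
  | case4 a b r h ih =>
    simp only [List.cons_append, pvCollapse, if_neg h, List.getLast?_cons_cons] at *
    rw [ih]
    split <;> rfl

theorem pvToList_ne_nil (x : String) (h : x ≠ "") : x.toList ≠ [] := by
  intro hc
  exact h (String.toList_inj.mp (by simpa using hc))

theorem pvGo_join (L : List String) :
    ∀ acc : List (List Char), (∀ l ∈ L, pvNB l) → L.getLast? ≠ some "" →
    PySem.Chars.splitlines.go pvIsBrk (PySem.Chars.join ['\n'] (L.map String.toList)) [] acc
      = acc.reverse ++ L.map String.toList := by
  induction L using pvCollapse.induct with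
  | case1 =>
    intro acc _ _
    simp [PySem.Chars.join, List.intercalate, pvGo_nil]
  | case2 x =>
    intro acc h1 h2
    have hx : x ≠ "" := by simpa using h2
    have : PySem.Chars.join ['\n'] ([x].map String.toList) = x.toList ++ [] := by
      simp [PySem.Chars.join, List.intercalate]
    rw [this, pvGo_prefix x.toList (h1 x (by simp)) [] [] acc, pvGo_nil]
    rw [if_neg (by simpa using pvToList_ne_nil x hx)]
    simp
  | case3 y r ih =>
    intro acc h1 h2
    have hxy : PySem.Chars.join ['\n'] ((y :: y :: r).map String.toList)
        = y.toList ++ '\n' :: PySem.Chars.join ['\n'] ((y :: r).map String.toList) := by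
      simp [PySem.Chars.join, List.intercalate]
    rw [hxy, pvGo_prefix y.toList (h1 y (by simp)) _ [] acc, pvGo_nl]
    rw [ih _ (fun m hm => h1 m (by simp [hm])) (by simpa using h2)]
    simp
  | case4 x y r hne ih =>
    intro acc h1 h2
    have hxy : PySem.Chars.join ['\n'] ((x :: y :: r).map String.toList)
        = x.toList ++ '\n' :: PySem.Chars.join ['\n'] ((y :: r).map String.toList) := by
      simp [PySem.Chars.join, List.intercalate]
    rw [hxy, pvGo_prefix x.toList (h1 x (by simp)) _ [] acc, pvGo_nl]
    rw [ih _ (fun m hm => h1 m (by simp [hm])) (by simpa using h2)]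
    simp

theorem pvSplitlines_join (L : List String) (h1 : ∀ l ∈ L, pvNB l)
    (h2 : L.getLast? ≠ some "") :
    PySem.Str.splitlines (PySem.Str.join "\n" L) = L := by
  unfold PySem.Str.splitlines PySem.Str.join
  have hb : (String.ofList (PySem.Chars.join "\n".toList (L.map String.toList))).toList
      = PySem.Chars.join ['\n'] (L.map String.toList) := by simp
  rw [hb, pvSplitlines_eq, pvGo_join L [] h1 h2]
  simp [List.map_map, Function.comp_def]

theorem pvNB_strip (s : String) (h : pvNB s) : pvNB (PySem.Str.strip s) := by
  intro c hc
  have hl : (PySem.Str.strip s).toList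
      = ((s.toList.dropWhile PySem.Chars.isspace).reverse.dropWhile PySem.Chars.isspace).reverse := by
    simp [PySem.Str.strip, PySem.Chars.strip, PySem.Chars.lstrip, PySem.Chars.rstrip]
  rw [hl] at hc
  have hc2 := (List.dropWhile_sublist _).subset (List.mem_reverse.mp hc)
  exact h c ((List.dropWhile_sublist _).subset (List.mem_reverse.mp hc2))

theorem pvNB_splitlines (s : String) : ∀ l ∈ PySem.Str.splitlines s, pvNB l := by
  intro l hl
  unfold PySem.Str.splitlines at hl
  rcases List.mem_map.mp hl with ⟨cs, hcs, rfl⟩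
  intro c hc
  have hcc : c ∈ cs := by simpa using hc
  rw [pvSplitlines_eq] at hcs
  exact pvGo_chunks s.toList [] [] (by simp) (by simp) cs hcs c hcc

theorem pvLastNonempty_eq (acc : List String) (h2 : acc.getLast? ≠ some "") :
    pvLastNonempty acc.getLast? = !acc.isEmpty := by
  cases hacc : acc.getLast? with
  | none =>
    rw [List.getLast?_eq_none_iff.mp hacc]
    rfl
  | some a =>
    have ha : a ≠ "" := by rintro rfl; exact h2 hacc
    have hne : acc ≠ [] := by rintro rfl; simp at hacc
    simp only [pvLastNonempty]
    rw [beq_eq_false_iff_ne.mpr ha]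
    rw [show acc.isEmpty = false by simpa using hne]

theorem pvNB_empty : pvNB "" := by intro c hc; simp at hc

theorem pvNB_fence : pvNB "```" := by
  intro c hc
  rw [show "```".toList = ['`', '`', '`'] from rfl] at hc
  fin_cases hc <;> rfl

theorem pvStep (acc : List String) (ln : String) (hln : pvNB ln) (hg : pvGood acc) :
    pvCleanStepB (pvCollapse acc, acc.getLast?) ln
      = (pvCollapse (pvCleanStepA acc ln), (pvCleanStepA acc ln).getLast?)
    ∧ pvGood (pvCleanStepA acc ln) := by
  unfold pvCleanStepA pvCleanStepB
  by_cases h1 : ((PySem.Str.strip ln).toList.isEmpty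
      || (PySem.Str.strip ln).toList.all fun c => pvDeco.contains c) = true
  · rw [if_pos h1, if_pos h1]; exact ⟨rfl, hg⟩
  · rw [if_neg h1, if_neg h1]
    by_cases h2 : (PySem.Str.startswith (PySem.Str.strip ln) "#"
        && decide (PySem.Str.len (PySem.Str.strip ln) < 5)) = true
    · rw [if_pos h2, if_pos h2]; exact ⟨rfl, hg⟩
    · rw [if_neg h2, if_neg h2]
      dsimp only
      set line := PySem.Str.strip ln with hlinedef
      have hlineNB : pvNB line := pvNB_strip ln hln
      have hlinene : line ≠ "" := by
        rintro h
        rw [h] at h1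
        simp at h1
      -- the normalized appended line
      set s1 := if (PySem.Str.startswith line "```" && decide (PySem.Str.len line ≤ 4)) = true
                then "```" else line with hs1def
      have hs1ne : s1 ≠ "" := by
        rw [hs1def]; split
        · decide
        · exact hlinene
      have hs1NB : pvNB s1 := by
        rw [hs1def]; split
        · exact pvNB_fence
        · exact hlineNB
      -- the two insert-blank-line conditions agree
      have hcond : (PySem.Str.startswith line "#" && pvLastNonempty acc.getLast?)
          = (PySem.Str.startswith line "#" && !acc.isEmpty) := by
        rw [pvLastNonempty_eq acc hg.2]
      rw [hcond]
      -- state after the optional blank line, on both sides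
      set acc1 := if (PySem.Str.startswith line "#" && !acc.isEmpty) = true
                  then acc ++ [""] else acc with hacc1def
      have hst1 : (if (PySem.Str.startswith line "#" && !acc.isEmpty) = true
            then (pvCollapse acc ++ [""], (some "" : Option String))
            else (pvCollapse acc, acc.getLast?))
          = (pvCollapse acc1, acc1.getLast?) := by
        rw [hacc1def]; split
        · rw [pvCollapse_append, if_neg hg.2, List.getLast?_concat]
        · rfl
      have hacc1NB : ∀ l ∈ acc1, pvNB l := by
        rw [hacc1def]; split
        · intro l hl
          rcases List.mem_append.mp hl with h | h
          · exact hg.1 l h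
          · rw [List.mem_singleton.mp h]; exact pvNB_empty
        · exact hg.1
      -- the final appended element is s1 in both ports
      have hA2 : (if (PySem.Str.startswith line "```" && decide (PySem.Str.len line ≤ 4)) = true
            then acc1 ++ ["```"] else acc1 ++ [line]) = acc1 ++ [s1] := by
        rw [hs1def]; split <;> rfl
      rw [hst1, hA2]
      refine ⟨?_, ?_, ?_⟩
      · rw [pvCollapse_append, List.getLast?_concat]
        by_cases hlast : acc1.getLast? = some s1
        · rw [if_pos hlast, if_pos hlast, hlast]
        · rw [if_neg hlast, if_neg hlast]
      · intro l hl
        rcases List.mem_append.mp hl with h | h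
        · exact hacc1NB l h
        · rw [List.mem_singleton.mp h]; exact hs1NB
      · rw [List.getLast?_concat]
        simp [hs1ne]

theorem pvFold (lines : List String) :
    ∀ acc : List String, (∀ l ∈ lines, pvNB l) → pvGood acc →
    lines.foldl pvCleanStepB (pvCollapse acc, acc.getLast?)
      = (pvCollapse (lines.foldl pvCleanStepA acc), (lines.foldl pvCleanStepA acc).getLast?)
    ∧ pvGood (lines.foldl pvCleanStepA acc) := by
  induction lines with
  | nil => intro acc _ hg; exact ⟨rfl, hg⟩
  | cons l ls ih =>
    intro acc hl hg
    obtain ⟨heq, hg'⟩ := pvStep acc l (hl l (by simp)) hg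
    simp only [List.foldl_cons, heq]
    exact ih _ (fun m hm => hl m (by simp [hm])) hg'

-- ===== VERDICT (by name: the statement is the Claim_ definition above) =====
theorem clean_template_for_llm_spec : Claim_equal_clean_template_for_llm := by
  intro raw _
  unfold Spec_clean_template_for_llm clean_template_for_llm clean_template_for_llm_alt
  dsimp only
  have hg0 : pvGood ([] : List String) := ⟨by simp, by simp⟩
  obtain ⟨heq, hg⟩ := pvFold (PySem.Str.splitlines raw) [] (pvNB_splitlines raw) hg0
  have hinit : (([], none) : List String × Option String)
      = (pvCollapse [], ([] : List String).getLast?) := rfl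
  rw [hinit, heq, pvSplitlines_join _ hg.1 hg.2]
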